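-- pv_equiv track=rewrite | github.com/Saulo94/Beecrowd | Ad-Hoc/1361.py | quantidade_piso
-- ===== SOURCE A (Python) =====
-- def quantidade_piso(lista_):
--     i = 0
--     while i < len(lista_) - 1:
--         if lista_[i][1] == lista_[i + 1][1]:
--             del(lista_[i])
--             i = 0
--         else:
--             i += 1
--     return len(lista_)
-- ===== SOURCE B (Python) =====
-- def quantidade_piso(lista_):
--     if not lista_:
--         return 0
--     return 1 + sum(1 for a, b in zip(lista_, lista_[1:]) if a[1] != b[1])
-- ===== Notes on version B (the rewrite author's own statement) =====
-- stated objective: simpler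
-- what changed: Replaced the restart-on-delete while loop (which mutates the list and rescans from index 0 after every deletion) with a single non-mutating pass counting adjacent pairs whose second components differ (runs = 1 + changes).
import Mathlib
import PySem

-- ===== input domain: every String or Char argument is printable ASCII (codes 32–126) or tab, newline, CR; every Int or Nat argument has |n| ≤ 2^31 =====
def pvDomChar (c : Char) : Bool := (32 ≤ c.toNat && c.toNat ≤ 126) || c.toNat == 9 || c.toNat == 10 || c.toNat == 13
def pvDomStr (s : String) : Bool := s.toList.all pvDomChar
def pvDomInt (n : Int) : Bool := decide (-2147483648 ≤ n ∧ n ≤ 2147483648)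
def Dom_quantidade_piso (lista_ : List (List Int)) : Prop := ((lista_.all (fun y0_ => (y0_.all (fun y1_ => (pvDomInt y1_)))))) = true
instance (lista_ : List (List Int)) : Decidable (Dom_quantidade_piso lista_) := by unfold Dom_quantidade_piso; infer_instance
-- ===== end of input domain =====

-- B replaces A's restart-on-delete while loop by one non-mutating pass counting
-- adjacent second-component changes (objective: simpler). A mutates lista_ in place
-- (del); B does not — the equivalence proved here is about the RETURN value only.

-- ===== PORT A =====
-- loop state: the (mutated) list l and the index i (i starts at 0 and is only
-- incremented or reset to 0, so it is carried as a Nat); `i < len(lista_) - 1`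
-- over Python ints equals `i + 1 < l.length` over Nat (including the empty list,
-- where len-1 = -1 and the loop does not run).
-- lista_[i][1] is in-range index i (Pre_ guarantees the inner [1]); getD is exact there.
def quantidade_piso_go (l : List (List Int)) (i : Nat) : Int :=
  if _h : i + 1 < l.length then
    if (l.getD i []).getD 1 0 = (l.getD (i + 1) []).getD 1 0 then
      quantidade_piso_go (l.eraseIdx i) 0      -- del(lista_[i]); i = 0
    else
      quantidade_piso_go l (i + 1)             -- i += 1
  else
    (l.length : Int)
termination_by (l.length, l.length - i)
decreasing_by
  all_goals first
    | (apply Prod.Lex.left; rw [List.length_eraseIdx]; split_ifs <;> omega)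
    | (apply Prod.Lex.right; omega)

def quantidade_piso (lista_ : List (List Int)) : Int :=
  quantidade_piso_go lista_ 0

-- ===== PORT B =====
-- the generator `sum(1 for a, b in zip(lista_, lista_[1:]) if a[1] != b[1])`:
-- structural recursion over the list paired with its tail.
def pvCountChanges (a : List Int) (rest : List (List Int)) : Int :=
  match rest with
  | [] => 0
  | b :: bs => (if a.getD 1 0 ≠ b.getD 1 0 then 1 else 0) + pvCountChanges b bs

def quantidade_piso_alt (lista_ : List (List Int)) : Int :=
  match lista_ with
  | [] => 0
  | x :: xs => 1 + pvCountChanges x xs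

-- ===== PRECONDITION & SPEC =====
-- Pre_ excludes exactly the inputs where Python A raises IndexError: a list of
-- length ≥ 2 containing an inner list with fewer than 2 elements (every element's
-- [1] is eventually read by the loop).
def Pre_quantidade_piso (lista_ : List (List Int)) : Prop :=
  lista_.length ≤ 1 ∨ ∀ l ∈ lista_, 2 ≤ l.length
instance (lista_ : List (List Int)) : Decidable (Pre_quantidade_piso lista_) := by
  unfold Pre_quantidade_piso; infer_instance

def pvWitness_quantidade_piso : List (List Int) := [[1, 2], [3, 2], [4, 5]]

def Spec_quantidade_piso (lista_ : List (List Int)) (out : Int) : Prop := out = quantidade_piso_alt lista_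
instance (lista_ : List (List Int)) (out : Int) : Decidable (Spec_quantidade_piso lista_ out) := by unfold Spec_quantidade_piso; infer_instance

-- ===== CLAIM (what is proved, stated in full; the proofs are below) =====
def Claim_equal_quantidade_piso : Prop := ∀ (lista_ : List (List Int)), Dom_quantidade_piso lista_ → Pre_quantidade_piso lista_ → Spec_quantidade_piso lista_ (quantidade_piso lista_)

-- ===== LEMMAS AND PROOFS =====

-- key of element j (second component, via the same getD chain both ports use)
def pvK (l : List (List Int)) (j : Nat) : Int := (l.getD j []).getD 1 0

theorem pvK_cons_succ (x : List Int) (xs : List (List Int)) (j : Nat) :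
    pvK (x :: xs) (j + 1) = pvK xs j := by
  simp [pvK]

theorem pvCountChanges_erase (a : List Int) (xs : List (List Int)) (n : Nat)
    (h : n + 1 < xs.length) (hk : pvK xs n = pvK xs (n + 1)) :
    pvCountChanges a (xs.eraseIdx n) = pvCountChanges a xs := by
  induction xs generalizing a n with
  | nil => simp at h
  | cons y ys ih =>
    cases n with
    | zero =>
      cases ys with
      | nil => simp at h
      | cons z zs =>
        have hyz : y.getD 1 0 = z.getD 1 0 := by simpa [pvK] using hk
        simp only [List.eraseIdx, pvCountChanges]
        rw [hyz]
        simp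
    | succ m =>
      have h' : m + 1 < ys.length := by simpa using h
      have hk' : pvK ys m = pvK ys (m + 1) := by
        simpa [pvK_cons_succ] using hk
      simp [List.eraseIdx, pvCountChanges, ih y m h' hk']

theorem alt_erase (l : List (List Int)) (i : Nat)
    (h : i + 1 < l.length) (hk : pvK l i = pvK l (i + 1)) :
    quantidade_piso_alt (l.eraseIdx i) = quantidade_piso_alt l := by
  cases l with
  | nil => simp at h
  | cons x xs =>
    cases i with
    | zero =>
      cases xs with
      | nil => simp at h
      | cons y ys =>
        have hxy : x.getD 1 0 = y.getD 1 0 := by simpa [pvK] using hk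
        simp only [List.eraseIdx, quantidade_piso_alt, pvCountChanges]
        rw [hxy]
        simp
    | succ n =>
      have h' : n + 1 < xs.length := by simpa using h
      have hk' : pvK xs n = pvK xs (n + 1) := by simpa [pvK_cons_succ] using hk
      simp [List.eraseIdx, quantidade_piso_alt,
        pvCountChanges_erase x xs n h' hk']

theorem alt_distinct (l : List (List Int))
    (h : ∀ j, j + 1 < l.length → pvK l j ≠ pvK l (j + 1)) :
    quantidade_piso_alt l = (l.length : Int) := by
  match l with
  | [] => simp [quantidade_piso_alt]
  | [x] => simp [quantidade_piso_alt, pvCountChanges]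
  | x :: y :: ys =>
    have h0 : pvK (x :: y :: ys) 0 ≠ pvK (x :: y :: ys) 1 := h 0 (by simp)
    have hxy : x.getD 1 0 ≠ y.getD 1 0 := by simpa [pvK] using h0
    have ht := alt_distinct (y :: ys) (fun j hj => by
      have := h (j + 1) (by simpa using Nat.succ_lt_succ hj)
      simpa [pvK_cons_succ] using this)
    simp only [quantidade_piso_alt, pvCountChanges, if_pos hxy, List.length_cons] at ht ⊢
    push_cast at ht ⊢
    omega

theorem go_eq (l : List (List Int)) (i : Nat)
    (inv : ∀ j, j < i → j + 1 < l.length → pvK l j ≠ pvK l (j + 1)) :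
    quantidade_piso_go l i = quantidade_piso_alt l := by
  rw [quantidade_piso_go]
  split
  case isTrue h =>
    split
    case isTrue heq =>
      rw [go_eq (l.eraseIdx i) 0 (by intro j hj; omega)]
      exact alt_erase l i h heq
    case isFalse hne =>
      apply go_eq l (i + 1)
      intro j hj hjl
      rcases Nat.lt_or_ge j i with hji | hji
      · exact inv j hji hjl
      · have : j = i := by omega
        subst this
        exact hne
  case isFalse h =>
    exact (alt_distinct l (fun j hj => inv j (by omega) hj)).symm
termination_by (l.length, l.length - i)
decreasing_by
  all_goals first
    | (apply Prod.Lex.left; rw [List.length_eraseIdx]; split_ifs <;> omega)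
    | (apply Prod.Lex.right; omega)

-- ===== VERDICT (by name: the statement is the Claim_ definition above) =====
theorem quantidade_piso_spec : Claim_equal_quantidade_piso := by
  intro lista_ _hDom _hPre
  unfold Spec_quantidade_piso quantidade_piso
  exact go_eq lista_ 0 (by intro j hj; omega)
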